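-- pv_equiv track=rewrite | github.com/wanyingl09/WanyingLi | 03_py/list2/sum13.py | sum13
-- ===== SOURCE A (Python) =====
-- def sum13(nums):
--   flag = False
--   summ = 0
--   for e in nums:
--     if e == 13:
--       flag = True
--     elif flag == True:
--       flag = False
--     else:
--       summ += e
--   return summ
-- ===== SOURCE B (Python) =====
-- def sum13(nums):
--     total = 0
--     i = 0
--     n = len(nums)
--     while i < n:
--         if nums[i] == 13:
--             # skip the whole run of consecutive 13s
--             while i < n and nums[i] == 13:
--                 i += 1
--             # and the single element following the run
--             i += 1
--         else:
--             total += nums[i]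
--             i += 1
--     return total
-- ===== Notes on version B (the rewrite author's own statement) =====
-- stated objective: alternative
-- what changed: Replaces the boolean-flag fold with an index/while-loop decomposition: an inner while advances past each run of consecutive 13s and one extra index drops the element after the run; no flag state is kept.
import Mathlib
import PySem

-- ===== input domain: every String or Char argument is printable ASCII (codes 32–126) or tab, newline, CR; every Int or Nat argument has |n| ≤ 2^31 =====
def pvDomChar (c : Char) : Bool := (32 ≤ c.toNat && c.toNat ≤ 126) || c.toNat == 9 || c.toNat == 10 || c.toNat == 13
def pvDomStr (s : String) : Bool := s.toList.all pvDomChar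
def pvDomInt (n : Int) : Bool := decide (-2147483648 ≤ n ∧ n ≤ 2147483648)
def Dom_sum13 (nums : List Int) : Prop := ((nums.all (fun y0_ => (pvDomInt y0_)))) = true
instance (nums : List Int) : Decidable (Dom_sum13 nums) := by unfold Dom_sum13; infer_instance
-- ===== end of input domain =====

-- B replaces A's boolean-flag fold by an index-style loop that skips each run of
-- consecutive 13s plus the single following element (alternative decomposition).

-- ===== PORT A =====
-- literal port of A: fold over nums carrying (flag, summ)
def sum13 (nums : List Int) : Int :=
  (nums.foldl
    (fun (st : Bool × Int) e =>
      if e = 13 then (true, st.2)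
      else if st.1 = true then (false, st.2)
      else (st.1, st.2 + e))
    (false, 0)).2

-- ===== PORT B =====
-- inner while loop: advance past the run of consecutive 13s
def sum13Drop13 : List Int → List Int
  | 13 :: t => sum13Drop13 t
  | l => l

theorem sum13Drop13_len_le : ∀ (l : List Int), (sum13Drop13 l).length ≤ l.length
  | [] => by simp [sum13Drop13]
  | x :: t => by
    by_cases h : x = 13
    · subst h
      simpa [sum13Drop13] using Nat.le_succ_of_le (sum13Drop13_len_le t)
    · simp [sum13Drop13, h]

-- outer while loop of Source B: on a 13, run the inner loop then advance one more index;
-- otherwise add the element and advance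
def sum13Go : List Int → Int → Int
  | [], total => total
  | x :: t, total =>
    if x = 13 then sum13Go ((sum13Drop13 t).drop 1) total
    else sum13Go t (total + x)
termination_by l _ => l.length
decreasing_by
  · have := sum13Drop13_len_le t
    simp; omega
  · simp

def sum13_alt (nums : List Int) : Int := sum13Go nums 0

-- ===== PRECONDITION & SPEC =====
def Spec_sum13 (nums : List Int) (out : Int) : Prop := out = sum13_alt nums
instance (nums : List Int) (out : Int) : Decidable (Spec_sum13 nums out) := by unfold Spec_sum13; infer_instance

-- ===== CLAIM (what is proved, stated in full; the proofs are below) =====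
def Claim_equal_sum13 : Prop := ∀ (nums : List Int), Dom_sum13 nums → Spec_sum13 nums (sum13 nums)

-- ===== LEMMAS AND PROOFS =====
def sum13Step : Bool × Int → Int → Bool × Int :=
  fun st e =>
    if e = 13 then (true, st.2)
    else if st.1 = true then (false, st.2)
    else (st.1, st.2 + e)

-- both flag states of A's fold, characterised by B's loop, by strong induction on length
theorem sum13_fold_go : ∀ (n : Nat) (l : List Int), l.length ≤ n →
    (∀ s, (l.foldl sum13Step (false, s)).2 = sum13Go l s) ∧
    (∀ s, (l.foldl sum13Step (true, s)).2 = sum13Go ((sum13Drop13 l).drop 1) s) := by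
  intro n
  induction n with
  | zero =>
    intro l hl
    have : l = [] := List.eq_nil_of_length_eq_zero (Nat.le_zero.mp hl)
    subst this
    constructor <;> intro s <;> simp [sum13Go, sum13Drop13]
  | succ n ih =>
    intro l hl
    match l with
    | [] => constructor <;> intro s <;> simp [sum13Go, sum13Drop13]
    | x :: t =>
      have ht : t.length ≤ n := by simpa using hl
      constructor
      · intro s
        by_cases h : x = 13
        · subst h
          have := (ih t ht).2 s
          simpa [sum13Step, sum13Go] using this
        · have := (ih t ht).1 (s + x)
          simpa [sum13Step, sum13Go, h] using this
      · intro s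
        by_cases h : x = 13
        · subst h
          have := (ih t ht).2 s
          simpa [sum13Step, sum13Drop13] using this
        · have := (ih t ht).1 s
          simpa [sum13Step, sum13Drop13, h, sum13Go] using this

-- ===== VERDICT (by name: the statement is the Claim_ definition above) =====
theorem sum13_spec : Claim_equal_sum13 := by
  intro nums _
  unfold Spec_sum13 sum13 sum13_alt
  exact (sum13_fold_go nums.length nums le_rfl).1 0
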